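-- pv_equiv track=rewrite | github.com/Rishi110996/old_llm_run | llm_V1/modified_trial8_multiple_models.py | adjudicate
-- ===== SOURCE A (Python) =====
-- from typing import Dict, Any, List
-- from typing import List, Dict, Any, Tuple, Optional
-- from typing import List, Dict, Any
--
-- def score_strength(strength: str) -> int:
--     return {"strong": 3, "medium": 2, "weak": 1}.get(strength, 0)
--
-- def adjudicate(final_evidence: List[Dict[str, Any]]) -> Tuple[Dict[str, int], int, List[str]]:
--     if not final_evidence:
--         return {"Malicious": 0, "Suspicious": 0, "Clean": 1}, 5, []
--
--     categories, risk, strong_count, iocs = {}, 0, 0, []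
--     for ev in final_evidence:
--         st, cat, ind = ev.get("strength", "weak"), ev.get("category", "other"), ev.get("indicator", "")
--         if ind: iocs.append(ind)
--         categories.setdefault(cat, {"strong": 0, "medium": 0, "weak": 0})
--         categories[cat][st] += 1
--         risk += score_strength(st)
--         if st == "strong" and cat in {"exec", "dynamic_loading", "networking", "evasion", "exfil", "sms"}:
--             strong_count += 1
--
--     distinct_medium_cats = sum(1 for c in categories.values() if c["medium"] > 0)
--     distinct_strong_cats = sum(1 for c in categories.values() if c["strong"] > 0)
--
--     # MALICIOUS
--     if strong_count >= 1 and distinct_strong_cats >= 1: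
--         return {"Malicious": 1, "Suspicious": 0, "Clean": 0}, min(100, 70 + 8 * strong_count + 3 * distinct_strong_cats), sorted(set(iocs))[:50]
--
--     # SUSPICIOUS
--     if distinct_medium_cats >= 3 or risk >= 15:
--         return {"Malicious": 0, "Suspicious": 1, "Clean": 0}, min(100, 50 + 2 * distinct_medium_cats + risk), sorted(set(iocs))[:50]
--
--     # CLEAN
--     return {"Malicious": 0, "Suspicious": 0, "Clean": 1}, min(100, max(5, 10 + risk)), sorted(set(iocs))[:50]
-- ===== SOURCE B (Python) =====
-- from typing import List, Dict, Any, Tuple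
--
--
-- def _dedup_adjacent(xs: List[str]) -> List[str]:
--     # xs sorted: keep the first element of each run of equal values
--     out: List[str] = []
--     for x in xs:
--         if not out or x != out[-1]:
--             out.append(x)
--     return out
--
--
-- def adjudicate(final_evidence: List[Dict[str, Any]]) -> Tuple[Dict[str, int], int, List[str]]:
--     if not final_evidence:
--         return {"Malicious": 0, "Suspicious": 0, "Clean": 1}, 5, []
--
--     SPECIAL = ("exec", "dynamic_loading", "networking", "evasion", "exfil", "sms")
--     risk = 0
--     strong_count = 0
--     strong_cats: List[str] = []
--     medium_cats: List[str] = []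
--     indicators: List[str] = []
--     for ev in final_evidence:
--         st = ev.get("strength", "weak")
--         cat = ev.get("category", "other")
--         ind = ev.get("indicator", "")
--         if ind:
--             indicators.append(ind)
--         if st == "strong":
--             risk += 3
--             strong_cats.append(cat)
--             if cat in SPECIAL:
--                 strong_count += 1
--         elif st == "medium":
--             risk += 2
--             medium_cats.append(cat)
--         elif st == "weak":
--             risk += 1
--
--     # distinct counts and deduplicated iocs by sort + adjacent scan (no hash sets)
--     iocs = _dedup_adjacent(sorted(indicators))[:50]
--     d_strong = len(_dedup_adjacent(sorted(strong_cats)))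
--     d_medium = len(_dedup_adjacent(sorted(medium_cats)))
--
--     if strong_count >= 1 and d_strong >= 1:
--         return {"Malicious": 1, "Suspicious": 0, "Clean": 0}, min(100, 70 + 8 * strong_count + 3 * d_strong), iocs
--     if d_medium >= 3 or risk >= 15:
--         return {"Malicious": 0, "Suspicious": 1, "Clean": 0}, min(100, 50 + 2 * d_medium + risk), iocs
--     return {"Malicious": 0, "Suspicious": 0, "Clean": 1}, min(100, max(5, 10 + risk)), iocs
-- ===== Notes on version B (the rewrite author's own statement) =====
-- stated objective: alternative
-- what changed: Replaces A's hash-based aggregation (a dict-of-dicts of per-category strength counters plus two post-loop counting sums, and sorted(set(iocs))) with sort-then-scan: one categorizing loop collects plain lists (strong/medium category lists, indicators), then each list is sorted and an adjacent-dedup scan yields the distinct-category counts and the deduplicated ioc list, so no set or dict of counters exists anywhere.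
import Mathlib
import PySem

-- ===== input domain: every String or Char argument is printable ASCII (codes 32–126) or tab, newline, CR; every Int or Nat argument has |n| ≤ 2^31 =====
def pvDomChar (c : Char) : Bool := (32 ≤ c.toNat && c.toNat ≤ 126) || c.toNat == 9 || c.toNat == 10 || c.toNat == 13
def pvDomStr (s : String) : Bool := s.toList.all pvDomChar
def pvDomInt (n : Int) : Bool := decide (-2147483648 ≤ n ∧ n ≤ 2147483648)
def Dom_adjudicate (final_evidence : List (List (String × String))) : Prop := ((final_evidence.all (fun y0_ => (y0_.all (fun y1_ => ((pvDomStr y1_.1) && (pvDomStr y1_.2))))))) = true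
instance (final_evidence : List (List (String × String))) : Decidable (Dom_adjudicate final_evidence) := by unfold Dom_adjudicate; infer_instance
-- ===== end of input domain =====

-- B replaces A's hash-based aggregation (dict-of-dicts of per-category counters, two post-loop
-- counting sums, sorted(set(iocs))) with sort-then-scan: a categorizing loop collects plain lists
-- and each is sorted and adjacent-dedup-scanned; same cost, no sets or counter dicts (alternative).

-- module helper score_strength, used by A
def scoreStrength (strength : String) : Int :=
  (PySem.Dict.ofList [("strong", (3 : Int)), ("medium", 2), ("weak", 1)]).getD strength 0

-- the inner counter literal {"strong": 0, "medium": 0, "weak": 0} of A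
def pvInnerZero : PySem.Dict String Int :=
  PySem.Dict.ofList [("strong", 0), ("medium", 0), ("weak", 0)]

-- the tuple/set literal ("exec", "dynamic_loading", "networking", "evasion", "exfil", "sms") (membership only)
def pvSpecialCats : List String :=
  ["exec", "dynamic_loading", "networking", "evasion", "exfil", "sms"]

-- ===== PORT A =====
def adjudicate (final_evidence : List (List (String × String))) : (List (String × Int)) × Int × List String :=
  if final_evidence = [] then ([("Malicious", 0), ("Suspicious", 0), ("Clean", 1)], 5, []) else
  let r := final_evidence.foldl (fun acc ev =>
      let categories := acc.1
      let risk := acc.2.1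
      let strong_count := acc.2.2.1
      let iocs := acc.2.2.2
      let d := PySem.Dict.ofList ev
      let st := d.getD "strength" "weak"
      let cat := d.getD "category" "other"
      let ind := d.getD "indicator" ""
      let iocs := if ind ≠ "" then iocs ++ [ind] else iocs
      let categories := categories.setdefault cat pvInnerZero
      -- categories[cat][st] += 1 : Python raises KeyError when st is not a key of the inner
      -- dict; those inputs are excluded by Pre_adjudicate, inside which modify is exact
      let categories := categories.modify cat pvInnerZero (fun inner => inner.modify st 0 (· + 1))
      let risk := risk + scoreStrength st
      let strong_count := if st == "strong" && pvSpecialCats.contains cat then strong_count + 1 else strong_count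
      (categories, risk, strong_count, iocs))
    ((PySem.Dict.empty : PySem.Dict String (PySem.Dict String Int)), (0 : Int), (0 : Int), ([] : List String))
  let categories := r.1
  let risk := r.2.1
  let strong_count := r.2.2.1
  let iocs := r.2.2.2
  let distinct_medium_cats : Int := categories.values.foldl (fun n c => if c.getD "medium" 0 > 0 then n + 1 else n) 0
  let distinct_strong_cats : Int := categories.values.foldl (fun n c => if c.getD "strong" 0 > 0 then n + 1 else n) 0
  if strong_count ≥ 1 ∧ distinct_strong_cats ≥ 1 then
    ([("Malicious", 1), ("Suspicious", 0), ("Clean", 0)],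
     min 100 (70 + 8 * strong_count + 3 * distinct_strong_cats),
     (PySem.List.sorted (PySem.Set.ofList iocs) (fun x => x) false).take 50)
  else if distinct_medium_cats ≥ 3 ∨ risk ≥ 15 then
    ([("Malicious", 0), ("Suspicious", 1), ("Clean", 0)],
     min 100 (50 + 2 * distinct_medium_cats + risk),
     (PySem.List.sorted (PySem.Set.ofList iocs) (fun x => x) false).take 50)
  else
    ([("Malicious", 0), ("Suspicious", 0), ("Clean", 1)],
     min 100 (max 5 (10 + risk)),
     (PySem.List.sorted (PySem.Set.ofList iocs) (fun x => x) false).take 50)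

-- ===== PORT B =====
-- helper _dedup_adjacent of Source B: keep the first element of each run of equal adjacent values
def pvDedupAdjacent (xs : List String) : List String :=
  xs.foldl (fun out x =>
    if out = [] ∨ x ≠ PySem.List.pyGetD out (-1) "" then out ++ [x] else out) []

def adjudicate_alt (final_evidence : List (List (String × String))) : (List (String × Int)) × Int × List String :=
  if final_evidence = [] then ([("Malicious", 0), ("Suspicious", 0), ("Clean", 1)], 5, []) else
  let r := final_evidence.foldl (fun acc ev =>
      let risk := acc.1
      let strong_count := acc.2.1
      let strong_cats := acc.2.2.1
      let medium_cats := acc.2.2.2.1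
      let indicators := acc.2.2.2.2
      let d := PySem.Dict.ofList ev
      let st := d.getD "strength" "weak"
      let cat := d.getD "category" "other"
      let ind := d.getD "indicator" ""
      let indicators := if ind ≠ "" then indicators ++ [ind] else indicators
      if st == "strong" then
        (risk + 3, (if pvSpecialCats.contains cat then strong_count + 1 else strong_count),
         strong_cats ++ [cat], medium_cats, indicators)
      else if st == "medium" then
        (risk + 2, strong_count, strong_cats, medium_cats ++ [cat], indicators)
      else if st == "weak" then
        (risk + 1, strong_count, strong_cats, medium_cats, indicators)
      else
        (risk, strong_count, strong_cats, medium_cats, indicators))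
    ((0 : Int), (0 : Int), ([] : List String), ([] : List String), ([] : List String))
  let risk := r.1
  let strong_count := r.2.1
  let iocs := (pvDedupAdjacent (PySem.List.sorted r.2.2.2.2 (fun x => x) false)).take 50
  let d_strong : Int := ((pvDedupAdjacent (PySem.List.sorted r.2.2.1 (fun x => x) false)).length : Int)
  let d_medium : Int := ((pvDedupAdjacent (PySem.List.sorted r.2.2.2.1 (fun x => x) false)).length : Int)
  if strong_count ≥ 1 ∧ d_strong ≥ 1 then
    ([("Malicious", 1), ("Suspicious", 0), ("Clean", 0)],
     min 100 (70 + 8 * strong_count + 3 * d_strong), iocs)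
  else if d_medium ≥ 3 ∨ risk ≥ 15 then
    ([("Malicious", 0), ("Suspicious", 1), ("Clean", 0)],
     min 100 (50 + 2 * d_medium + risk), iocs)
  else
    ([("Malicious", 0), ("Suspicious", 0), ("Clean", 1)],
     min 100 (max 5 (10 + risk)), iocs)

-- ===== PRECONDITION & SPEC =====
-- Pre_ excludes exactly the inputs where some evidence dict carries a "strength" value other
-- than "strong"/"medium"/"weak": there Python A raises KeyError at categories[cat][st] += 1.
def Pre_adjudicate (final_evidence : List (List (String × String))) : Prop :=
  ∀ ev ∈ final_evidence, (PySem.Dict.ofList ev).getD "strength" "weak" ∈ (["strong", "medium", "weak"] : List String)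
instance (final_evidence : List (List (String × String))) : Decidable (Pre_adjudicate final_evidence) := by unfold Pre_adjudicate; infer_instance

def pvWitness_adjudicate : (List (List (String × String))) :=
  [[("strength", "strong"), ("category", "exec"), ("indicator", "1.2.3.4")],
   [("strength", "medium"), ("category", "sms")]]

def Spec_adjudicate (final_evidence : List (List (String × String))) (out : (List (String × Int)) × Int × List String) : Prop := out = adjudicate_alt final_evidence
instance (final_evidence : List (List (String × String))) (out : (List (String × Int)) × Int × List String) : Decidable (Spec_adjudicate final_evidence out) := by unfold Spec_adjudicate; infer_instance

-- ===== CLAIM (what is proved, stated in full; the proofs are below) =====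
def Claim_equal_adjudicate : Prop := ∀ (final_evidence : List (List (String × String))), Dom_adjudicate final_evidence → Pre_adjudicate final_evidence → Spec_adjudicate final_evidence (adjudicate final_evidence)

-- ===== LEMMAS AND PROOFS =====

-- per-strength score of B's branch chain (proof-side normal form)
def pvBranchScore (st : String) : Int :=
  if st = "strong" then 3 else if st = "medium" then 2 else if st = "weak" then 1 else 0

-- counting foldl = filter length
theorem pv_count_foldl {α : Type} (p : α → Prop) [DecidablePred p] (l : List α) (n : Int) :
    l.foldl (fun n c => if p c then n + 1 else n) n = n + ((l.filter (fun c => decide (p c))).length : Int) := by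
  induction l generalizing n with
  | nil => simp
  | cons x xs ih =>
    by_cases h : p x <;> simp [List.foldl_cons, ih, h] <;> ring

theorem pv_getD_setdefault_of_ne {κ ν : Type} [BEq κ] [LawfulBEq κ] (d : PySem.Dict κ ν)
    {k k' : κ} (v d0 : ν) (h : k' ≠ k) : (d.setdefault k v).getD k' d0 = d.getD k' d0 := by
  rw [PySem.Dict.getD_eq_get?_getD, PySem.Dict.get?_setdefault_of_ne _ _ h,
    ← PySem.Dict.getD_eq_get?_getD]

theorem pv_foldA_inv (fe : List (List (String × String))) :
    (fun R l =>
     R.1.keys = PySem.Set.ofList (l.map (fun t => t.2.1))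
     ∧ R.2.1 = (l.map (fun t => scoreStrength t.1)).foldl (· + ·) 0
     ∧ R.2.2.1 = (((l.filter (fun t => t.1 == "strong" && pvSpecialCats.contains t.2.1)).length : Nat) : Int)
     ∧ R.2.2.2 = (l.map (fun t => t.2.2)).filter (fun i => i ≠ "")
     ∧ (∀ c : String, (R.1.getD c pvInnerZero).getD "medium" 0 = (((l.filter (fun t => t.1 == "medium" && t.2.1 == c)).length : Nat) : Int))
     ∧ (∀ c : String, (R.1.getD c pvInnerZero).getD "strong" 0 = (((l.filter (fun t => t.1 == "strong" && t.2.1 == c)).length : Nat) : Int)))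
    (fe.foldl (fun acc ev =>
      let categories := acc.1
      let risk := acc.2.1
      let strong_count := acc.2.2.1
      let iocs := acc.2.2.2
      let d := PySem.Dict.ofList ev
      let st := d.getD "strength" "weak"
      let cat := d.getD "category" "other"
      let ind := d.getD "indicator" ""
      let iocs := if ind ≠ "" then iocs ++ [ind] else iocs
      let categories := categories.setdefault cat pvInnerZero
      let categories := categories.modify cat pvInnerZero (fun inner => inner.modify st 0 (· + 1))
      let risk := risk + scoreStrength st
      let strong_count := if st == "strong" && pvSpecialCats.contains cat then strong_count + 1 else strong_count
      (categories, risk, strong_count, iocs))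
    ((PySem.Dict.empty : PySem.Dict String (PySem.Dict String Int)), (0 : Int), (0 : Int), ([] : List String)))
    (fe.map (fun ev =>
      let d := PySem.Dict.ofList ev
      ((d.getD "strength" "weak", d.getD "category" "other", d.getD "indicator" "") : String × String × String))) := by
  induction fe using List.reverseRecOn with
  | nil =>
    refine ⟨by simp [PySem.Set.ofList], rfl, rfl, rfl, ?_, ?_⟩ <;>
      · intro c; simp [PySem.Dict.getD_empty, pvInnerZero]; decide
  | append_singleton xs ev ih =>
    obtain ⟨hk, hr, hs, hi, hm, hg⟩ := ih
    simp only [] at hk hr hs hi hm hg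
    simp only [List.foldl_append, List.foldl_cons, List.foldl_nil, List.map_append,
      List.map_cons, List.map_nil]
    refine ⟨?_, ?_, ?_, ?_, ?_, ?_⟩
    · simp only [PySem.Dict.keys_modify]
      rw [PySem.Dict.keys_insert_of_contains _ _ (by simp [PySem.Dict.contains_setdefault])]
      rw [PySem.Dict.keys_setdefault, PySem.Set.ofList_append_singleton, PySem.Set.add_eq_ite,
        ← hk]
      split_ifs with h1 h2 h2
      · rfl
      · exact absurd ((PySem.Dict.contains_iff_mem_keys _ _).1 h1) h2
      · exact absurd ((PySem.Dict.contains_iff_mem_keys _ _).2 h2) h1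
      · rfl
    · rw [hr]
    · simp only [List.filter_append, List.filter_cons, List.filter_nil, List.length_append]
      rw [hs]
      by_cases h : (((PySem.Dict.ofList ev).getD "strength" "weak" == "strong") &&
          pvSpecialCats.contains ((PySem.Dict.ofList ev).getD "category" "other")) = true
      · simp only [if_pos h, List.length_cons, List.length_nil]
        push_cast; omega
      · simp only [if_neg h, List.length_nil]
        push_cast; omega
    · simp only [List.filter_append, List.filter_cons, List.filter_nil]
      rw [hi]
      by_cases h : (PySem.Dict.ofList ev).getD "indicator" "" = ""
      · simp [h]
      · simp [h]
    · intro c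
      by_cases hc : c = ((PySem.Dict.ofList ev).getD "category" "other")
      · rw [hc, PySem.Dict.getD_modify, if_pos rfl, PySem.Dict.getD_setdefault_self,
          PySem.Dict.getD_modify]
        simp only [List.filter_append, List.filter_cons, List.filter_nil, List.length_append]
        by_cases hst : (PySem.Dict.ofList ev).getD "strength" "weak" = "medium"
        · rw [hst, if_pos rfl, hm]
          simp
        · rw [if_neg (fun hh => hst hh.symm), hm]
          simp [hst]
      · rw [PySem.Dict.getD_modify, if_neg hc, pv_getD_setdefault_of_ne _ _ _ hc, hm c]
        simp only [List.filter_append, List.filter_cons, List.filter_nil, List.length_append]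
        simp [Ne.symm hc]
    · intro c
      by_cases hc : c = ((PySem.Dict.ofList ev).getD "category" "other")
      · rw [hc, PySem.Dict.getD_modify, if_pos rfl, PySem.Dict.getD_setdefault_self,
          PySem.Dict.getD_modify]
        simp only [List.filter_append, List.filter_cons, List.filter_nil, List.length_append]
        by_cases hst : (PySem.Dict.ofList ev).getD "strength" "weak" = "strong"
        · rw [hst, if_pos rfl, hg]
          simp
        · rw [if_neg (fun hh => hst hh.symm), hg]
          simp [hst]
      · rw [PySem.Dict.getD_modify, if_neg hc, pv_getD_setdefault_of_ne _ _ _ hc, hg c]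
        simp only [List.filter_append, List.filter_cons, List.filter_nil, List.length_append]
        simp [Ne.symm hc]

theorem pv_distinct_len (s : String) (l : List (String × String × String)) (F : String → Int)
    (hF : ∀ k, F k = (((l.filter (fun t => t.1 == s && t.2.1 == k)).length : Nat) : Int)) :
    ((PySem.Set.ofList (l.map (fun t => t.2.1))).filter (fun k => decide (F k > 0))).length
      = (PySem.Set.ofList ((l.filter (fun t => t.1 == s)).map (fun t => t.2.1))).length := by
  apply List.Perm.length_eq
  rw [List.perm_ext_iff_of_nodup (List.Nodup.filter _ (PySem.Set.nodup_ofList _))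
    (PySem.Set.nodup_ofList _)]
  intro k
  simp only [List.mem_filter, PySem.Set.mem_ofList, List.mem_map, decide_eq_true_eq, hF,
    Int.natCast_pos, List.length_pos_iff_exists_mem, Bool.and_eq_true, beq_iff_eq]
  constructor
  · rintro ⟨-, t, ht, h1, h2⟩
    exact ⟨t, ⟨ht, h1⟩, h2⟩
  · rintro ⟨t, ⟨ht, h1⟩, h2⟩
    exact ⟨⟨t, ht, h2⟩, t, ht, h1, h2⟩

-- structural form of B's adjacent-dedup scan: pvGo p l drops elements equal to the last kept one
def pvGo (p : String) : List String → List String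
  | [] => []
  | y :: r => if y = p then pvGo p r else y :: pvGo y r

theorem pv_dedup_foldl (l : List String) : ∀ (out : List String) (p : String),
    out.getLast? = some p →
    l.foldl (fun out x =>
      if out = [] ∨ x ≠ PySem.List.pyGetD out (-1) "" then out ++ [x] else out) out
      = out ++ pvGo p l := by
  induction l with
  | nil => intro out p _; simp [pvGo]
  | cons x l ih =>
    intro out p hp
    have hne : out ≠ [] := by rintro rfl; simp at hp
    have hlast : PySem.List.pyGetD out (-1) "" = p := by
      rw [PySem.List.pyGetD_neg_one out "" hne, List.getLast_eq_iff_getLast?_eq_some]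
      exact hp
    simp only [List.foldl_cons]
    by_cases hx : x = p
    · rw [if_neg (by simp [hne, hlast, hx]), ih out p hp, pvGo, if_pos hx]
    · rw [if_pos (Or.inr (by simp [hlast, hx])),
        ih (out ++ [x]) x (by simp), pvGo, if_neg hx]
      simp

theorem pv_dedup_cons (x : String) (r : List String) :
    pvDedupAdjacent (x :: r) = x :: pvGo x r := by
  unfold pvDedupAdjacent
  rw [List.foldl_cons, if_pos (Or.inl rfl)]
  simpa using pv_dedup_foldl r [x] x (by simp)

theorem pv_go_sorted (r : List String) : ∀ (p : String), (p :: r).Pairwise (· ≤ ·) →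
    (p :: pvGo p r).Pairwise (· < ·) ∧ ∀ a, (a ∈ p :: pvGo p r ↔ a ∈ p :: r) := by
  induction r with
  | nil => intro p _; simp [pvGo]
  | cons y r ih =>
    intro p hpw
    have hpy : p ≤ y := (List.pairwise_cons.1 hpw).1 y (by simp)
    have hyr : (y :: r).Pairwise (· ≤ ·) := (List.pairwise_cons.1 hpw).2
    by_cases hy : y = p
    · have hpr : (p :: r).Pairwise (· ≤ ·) := by
        rw [List.pairwise_cons] at hpw ⊢
        exact ⟨fun a ha => hpw.1 a (by simp [ha]), (List.pairwise_cons.1 hpw.2).2⟩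
      obtain ⟨h1, h2⟩ := ih p hpr
      refine ⟨by simpa [pvGo, hy] using h1, fun a => ?_⟩
      rw [pvGo, if_pos hy]
      constructor
      · intro ha
        rcases List.mem_cons.1 ((h2 a).1 ha) with h | h
        · simp [h]
        · simp [h]
      · intro ha
        apply (h2 a).2
        rcases List.mem_cons.1 ha with h | h
        · simp [h]
        · rcases List.mem_cons.1 h with h' | h'
          · simp [h', hy]
          · simp [h']
    · obtain ⟨h1, h2⟩ := ih y hyr
      have hplt : p < y := lt_of_le_of_ne hpy (fun h => hy h.symm)
      refine ⟨?_, fun a => ?_⟩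
      · rw [pvGo, if_neg hy, List.pairwise_cons]
        refine ⟨fun a ha => ?_, h1⟩
        rcases List.mem_cons.1 ha with h | h
        · exact h ▸ hplt
        · have haIn : a ∈ y :: r := (h2 a).1 (by simp [h])
          have : y ≤ a := by
            rcases List.mem_cons.1 haIn with h' | h'
            · exact h' ▸ le_refl _
            · exact (List.pairwise_cons.1 hyr).1 a h'
          exact lt_of_lt_of_le hplt this
      · rw [pvGo, if_neg hy]
        constructor
        · intro ha
          rcases List.mem_cons.1 ha with h | h
          · simp [h]
          · have := (h2 a).1 h
            simp [List.mem_cons.1 this]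
        · intro ha
          rcases List.mem_cons.1 ha with h | h
          · simp [h]
          · have := (h2 a).2 h
            simp [this]

-- sort + adjacent-dedup computes sorted(set(l)) exactly
theorem pv_dedup_sorted_eq (l : List String) :
    pvDedupAdjacent (PySem.List.sorted l (fun x => x) false)
      = PySem.List.sorted (PySem.Set.ofList l) (fun x => x) false := by
  cases h : PySem.List.sorted l (fun x => x) false with
  | nil =>
    have hl : l = [] := (PySem.List.sorted_eq_nil_iff _ _ _).1 h
    subst hl
    rfl
  | cons x r =>
    have hpw : (x :: r).Pairwise (· ≤ ·) := by
      have := PySem.List.sorted_pairwise (xs := l) (key := fun (x : String) => x)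
      rw [h] at this
      exact this
    obtain ⟨hlt, hmem⟩ := pv_go_sorted r x hpw
    rw [pv_dedup_cons]
    have hperm : (x :: pvGo x r).Perm (PySem.Set.ofList l) := by
      rw [List.perm_ext_iff_of_nodup (List.Pairwise.imp ne_of_lt hlt) (PySem.Set.nodup_ofList _)]
      intro a
      rw [hmem a, ← h, PySem.List.mem_sorted, PySem.Set.mem_ofList]
    exact (PySem.List.sorted_eq_of_perm_of_pairwise_lt _ _ (fun x => x) hperm hlt).symm

theorem pv_dedup_sorted_len (l : List String) :
    (pvDedupAdjacent (PySem.List.sorted l (fun x => x) false)).length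
      = (PySem.Set.ofList l).length := by
  rw [pv_dedup_sorted_eq, PySem.List.length_sorted]

-- loop invariant of B's single categorizing pass, for an arbitrary accumulator
theorem pv_foldB_gen (fe : List (List (String × String))) :
    ∀ (a : Int × Int × List String × List String × List String),
    (fe.foldl (fun acc ev =>
      let risk := acc.1
      let strong_count := acc.2.1
      let strong_cats := acc.2.2.1
      let medium_cats := acc.2.2.2.1
      let indicators := acc.2.2.2.2
      let d := PySem.Dict.ofList ev
      let st := d.getD "strength" "weak"
      let cat := d.getD "category" "other"
      let ind := d.getD "indicator" ""
      let indicators := if ind ≠ "" then indicators ++ [ind] else indicators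
      if st == "strong" then
        (risk + 3, (if pvSpecialCats.contains cat then strong_count + 1 else strong_count),
         strong_cats ++ [cat], medium_cats, indicators)
      else if st == "medium" then
        (risk + 2, strong_count, strong_cats, medium_cats ++ [cat], indicators)
      else if st == "weak" then
        (risk + 1, strong_count, strong_cats, medium_cats, indicators)
      else
        (risk, strong_count, strong_cats, medium_cats, indicators)) a)
    = (fun (l : List (String × String × String)) =>
       (a.1 + (l.map (fun t => pvBranchScore t.1)).sum,
        a.2.1 + (((l.filter (fun t => t.1 == "strong" && pvSpecialCats.contains t.2.1)).length : Nat) : Int),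
        a.2.2.1 ++ (l.filter (fun t => t.1 == "strong")).map (fun t => t.2.1),
        a.2.2.2.1 ++ (l.filter (fun t => t.1 == "medium")).map (fun t => t.2.1),
        a.2.2.2.2 ++ (l.map (fun t => t.2.2)).filter (fun i => i ≠ "")))
      (fe.map (fun ev =>
        let d := PySem.Dict.ofList ev
        ((d.getD "strength" "weak", d.getD "category" "other", d.getD "indicator" "") : String × String × String))) := by
  induction fe with
  | nil => intro a; simp
  | cons ev fe ih =>
    intro a
    rw [List.foldl_cons, ih]
    simp only [List.map_cons, List.filter_cons]
    by_cases hind : (PySem.Dict.ofList ev).getD "indicator" "" = ""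
    · by_cases h1 : (PySem.Dict.ofList ev).getD "strength" "weak" = "strong"
      · by_cases hc : ((PySem.Dict.ofList ev).getD "category" "other") ∈ pvSpecialCats
        · simp [h1, hc, hind, pvBranchScore] <;> (try (refine ⟨trivial, ?_⟩)) <;> omega
        · simp [h1, hc, hind, pvBranchScore] <;> (try (refine ⟨trivial, ?_⟩)) <;> omega
      · by_cases h2 : (PySem.Dict.ofList ev).getD "strength" "weak" = "medium"
        · simp [h1, h2, hind, pvBranchScore] <;> (try (refine ⟨trivial, ?_⟩)) <;> omega
        · by_cases h3 : (PySem.Dict.ofList ev).getD "strength" "weak" = "weak"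
          · simp [h1, h2, h3, hind, pvBranchScore] <;> (try (refine ⟨trivial, ?_⟩)) <;> omega
          · simp [h1, h2, h3, hind, pvBranchScore] <;> (try (refine ⟨trivial, ?_⟩)) <;> omega
    · by_cases h1 : (PySem.Dict.ofList ev).getD "strength" "weak" = "strong"
      · by_cases hc : ((PySem.Dict.ofList ev).getD "category" "other") ∈ pvSpecialCats
        · simp [h1, hc, hind, pvBranchScore] <;> (try (refine ⟨trivial, ?_⟩)) <;> omega
        · simp [h1, hc, hind, pvBranchScore] <;> (try (refine ⟨trivial, ?_⟩)) <;> omega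
      · by_cases h2 : (PySem.Dict.ofList ev).getD "strength" "weak" = "medium"
        · simp [h1, h2, hind, pvBranchScore] <;> (try (refine ⟨trivial, ?_⟩)) <;> omega
        · by_cases h3 : (PySem.Dict.ofList ev).getD "strength" "weak" = "weak"
          · simp [h1, h2, h3, hind, pvBranchScore] <;> (try (refine ⟨trivial, ?_⟩)) <;> omega
          · simp [h1, h2, h3, hind, pvBranchScore] <;> (try (refine ⟨trivial, ?_⟩)) <;> omega

-- under Pre_, A's dict-based score equals B's branch-chain score
theorem pv_score_eq (st : String) (h : st ∈ (["strong", "medium", "weak"] : List String)) :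
    scoreStrength st = pvBranchScore st := by
  simp only [List.mem_cons, List.not_mem_nil, or_false] at h
  rcases h with rfl | rfl | rfl <;> decide

theorem pv_main (fe : List (List (String × String))) (hfe : ¬ fe = [])
    (hpre : Pre_adjudicate fe) : adjudicate fe = adjudicate_alt fe := by
  obtain ⟨hk, hr, hs, hi, hm, hg⟩ := pv_foldA_inv fe
  have hB := pv_foldB_gen fe ((0 : Int), (0 : Int), ([] : List String), ([] : List String), ([] : List String))
  simp only [] at hk hr hs hi hm hg hB
  have hscore : (fe.map (fun ev =>
      ((PySem.Dict.ofList ev).getD "strength" "weak",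
       (PySem.Dict.ofList ev).getD "category" "other",
       (PySem.Dict.ofList ev).getD "indicator" ""))).map (fun t => scoreStrength t.1)
      = (fe.map (fun ev =>
      ((PySem.Dict.ofList ev).getD "strength" "weak",
       (PySem.Dict.ofList ev).getD "category" "other",
       (PySem.Dict.ofList ev).getD "indicator" ""))).map (fun t => pvBranchScore t.1) := by
    apply List.map_congr_left
    intro t ht
    rcases List.mem_map.1 ht with ⟨ev, hev, rfl⟩
    exact pv_score_eq _ (hpre ev hev)
  have hnd := PySem.Set.nodup_ofList ((fe.map (fun ev =>
      (((PySem.Dict.ofList ev).getD "strength" "weak", (PySem.Dict.ofList ev).getD "category" "other",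
        (PySem.Dict.ofList ev).getD "indicator" "") : String × String × String))).map (fun t => t.2.1))
  rw [← hk] at hnd
  simp only [adjudicate, adjudicate_alt, if_neg hfe]
  rw [PySem.Dict.values_eq_map_keys _ hnd pvInnerZero]
  rw [pv_count_foldl, pv_count_foldl, List.filter_map, List.filter_map,
    List.length_map, List.length_map]
  simp only [Function.comp_def]
  rw [hk]
  rw [pv_distinct_len "medium" _ _ hm, pv_distinct_len "strong" _ _ hg]
  rw [hr, hscore, hs, hi, hB]
  simp only [zero_add, List.nil_append]
  rw [pv_dedup_sorted_len, pv_dedup_sorted_len, pv_dedup_sorted_eq, List.sum_eq_foldl]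

-- ===== VERDICT (by name: the statement is the Claim_ definition above) =====
theorem adjudicate_spec : Claim_equal_adjudicate := by
  intro fe _ hpre
  unfold Spec_adjudicate
  by_cases hfe : fe = []
  · simp [adjudicate, adjudicate_alt, hfe]
  · exact pv_main fe hfe hpre
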